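-- pv_equiv track=rewrite | github.com/ALowtonQA/python-pre-learning-tasks-published | tasks/vowel_swapper.py | vowel_swapper
-- ===== SOURCE A (Python) =====
-- def vowel_swapper(string):
--     swaps = {"a": "4", "e": "3", "i": "!", "o": "ooo", "O": "000", "u": "|_|"}
--
--     for c in swaps:
--         replacement = swaps.get(c, c)
--         if c in ("o", "O"):
--             string = string.replace(c, replacement)
--         else:
--             string = string.replace(c, replacement).replace(c.upper(), replacement)
--     return string
-- ===== SOURCE B (Python) =====
-- def vowel_swapper(string):
--     table = {"a": "4", "A": "4", "e": "3", "E": "3", "i": "!", "I": "!",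
--              "o": "ooo", "O": "000", "u": "|_|", "U": "|_|"}
--     return "".join(table.get(ch, ch) for ch in string)
-- ===== Notes on version B (the rewrite author's own statement) =====
-- stated objective: simpler
-- what changed: A rewrites the whole string ten times via repeated str.replace passes; B makes a single character-level pass joining lookups in one explicit table (with A's o/O asymmetry encoded directly).
import Mathlib
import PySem

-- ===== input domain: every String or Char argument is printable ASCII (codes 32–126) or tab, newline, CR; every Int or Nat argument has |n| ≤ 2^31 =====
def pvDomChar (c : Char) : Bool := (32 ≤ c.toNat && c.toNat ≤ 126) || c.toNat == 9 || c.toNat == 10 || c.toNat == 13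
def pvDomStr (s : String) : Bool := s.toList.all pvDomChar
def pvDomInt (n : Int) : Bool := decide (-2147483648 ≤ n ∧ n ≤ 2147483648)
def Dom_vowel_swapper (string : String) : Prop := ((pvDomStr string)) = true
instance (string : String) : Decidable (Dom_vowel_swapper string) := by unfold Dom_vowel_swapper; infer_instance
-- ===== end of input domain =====

-- B replaces A's ten whole-string str.replace passes with a single per-character pass over one
-- explicit lookup table (objective: simpler); return values proved equal on the whole domain.

-- ===== PORT A =====
def vowel_swapper (string : String) : String :=
  let swaps : PySem.Dict String String :=
    PySem.Dict.ofList [("a", "4"), ("e", "3"), ("i", "!"), ("o", "ooo"), ("O", "000"), ("u", "|_|")]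
  (PySem.Dict.keys swaps).foldl (fun s c =>
    let replacement := PySem.Dict.getD swaps c c
    if c = "o" ∨ c = "O" then
      PySem.Str.replace s c replacement
    else
      PySem.Str.replace (PySem.Str.replace s c replacement) (PySem.Str.upper c) replacement)
    string

-- ===== PORT B =====
def vowel_swapper_table : PySem.Dict Char String :=
  PySem.Dict.ofList
    [('a', "4"), ('A', "4"), ('e', "3"), ('E', "3"), ('i', "!"), ('I', "!"),
     ('o', "ooo"), ('O', "000"), ('u', "|_|"), ('U', "|_|")]

def vowel_swapper_alt (string : String) : String :=
  PySem.Str.join ""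
    (string.toList.map (fun ch => PySem.Dict.getD vowel_swapper_table ch (String.singleton ch)))

-- ===== PRECONDITION & SPEC =====
def Spec_vowel_swapper (string : String) (out : String) : Prop := out = vowel_swapper_alt string
instance (string : String) (out : String) : Decidable (Spec_vowel_swapper string out) := by unfold Spec_vowel_swapper; infer_instance

-- ===== CLAIM (what is proved, stated in full; the proofs are below) =====
def Claim_equal_vowel_swapper : Prop := ∀ (string : String), Dom_vowel_swapper string → Spec_vowel_swapper string (vowel_swapper string)

-- ===== LEMMAS AND PROOFS =====

theorem pv_go_single (ch : Char) (new : List Char) :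
    ∀ (l : List Char) (fuel : Nat) (acc : List Char), l.length ≤ fuel →
    PySem.Chars.replace.go [ch] new fuel l acc
      = acc.reverse ++ l.flatMap (fun c => if c = ch then new else [c]) := by
  intro l
  induction l with
  | nil => intro fuel acc _; cases fuel <;> simp [PySem.Chars.replace.go]
  | cons c t ih =>
    intro fuel acc h
    cases fuel with
    | zero => simp at h
    | succ f =>
      simp only [PySem.Chars.replace.go]
      by_cases hc : c = ch
      · subst hc
        rw [if_pos (by simp [List.isPrefixOf])]
        simp only [List.length_cons, List.length_nil, List.drop_succ_cons, List.drop_zero]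
        rw [ih f (new.reverse ++ acc) (by simpa using h)]
        simp
      · have hpre : [ch].isPrefixOf (c :: t) = false := by
          simp [List.isPrefixOf]
          intro hh; exact hc hh.symm
        rw [if_neg (by simp [hpre])]
        rw [ih f (c :: acc) (by simpa using h)]
        simp [hc]

theorem pv_replace_single (s : List Char) (ch : Char) (new : List Char) :
    PySem.Chars.replace s [ch] new = s.flatMap (fun c => if c = ch then new else [c]) := by
  simp [PySem.Chars.replace, pv_go_single ch new s s.length [] le_rfl]

-- one single-char replacement step as a per-character function
def pvStep (ch : Char) (new : List Char) (c : Char) : List Char := if c = ch then new else [c]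

-- the composition of A's ten replacement passes, on a list of characters
def pvRep (l : List Char) : List Char :=
  (((((((((l.flatMap (pvStep 'a' ['4'])).flatMap (pvStep 'A' ['4'])).flatMap
    (pvStep 'e' ['3'])).flatMap (pvStep 'E' ['3'])).flatMap
    (pvStep 'i' ['!'])).flatMap (pvStep 'I' ['!'])).flatMap
    (pvStep 'o' ['o','o','o'])).flatMap (pvStep 'O' ['0','0','0'])).flatMap
    (pvStep 'u' ['|','_','|'])).flatMap (pvStep 'U' ['|','_','|'])

-- that composition applied to a single character
def pvChainA (c : Char) : List Char := pvRep [c]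

theorem pvRep_append (x y : List Char) : pvRep (x ++ y) = pvRep x ++ pvRep y := by
  simp [pvRep, List.flatMap_append]

theorem pvRep_eq (l : List Char) : pvRep l = l.flatMap pvChainA := by
  induction l with
  | nil => simp [pvRep]
  | cons c t ih =>
    rw [show c :: t = [c] ++ t from rfl, pvRep_append, ih, List.flatMap_append,
      List.flatMap_cons, List.flatMap_nil, List.append_nil, pvChainA]

theorem pv_A_chain (s : String) : vowel_swapper s =
  PySem.Str.replace (PySem.Str.replace (PySem.Str.replace (PySem.Str.replace (PySem.Str.replace
    (PySem.Str.replace (PySem.Str.replace (PySem.Str.replace (PySem.Str.replace (PySem.Str.replace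
      s "a" "4") "A" "4") "e" "3") "E" "3") "i" "!") "I" "!") "o" "ooo") "O" "000") "u" "|_|") "U" "|_|" := by
  rfl

theorem pv_vowel_swapper_eq (s : String) :
    vowel_swapper s = String.ofList (s.toList.flatMap pvChainA) := by
  rw [pv_A_chain, ← String.toList_inj, String.toList_ofList]
  simp only [PySem.Str.toList_replace, pv_replace_single,
    show ("a" : String).toList = ['a'] from rfl, show ("4" : String).toList = ['4'] from rfl,
    show ("e" : String).toList = ['e'] from rfl, show ("3" : String).toList = ['3'] from rfl,
    show ("i" : String).toList = ['i'] from rfl, show ("!" : String).toList = ['!'] from rfl,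
    show ("o" : String).toList = ['o'] from rfl, show ("ooo" : String).toList = ['o','o','o'] from rfl,
    show ("O" : String).toList = ['O'] from rfl, show ("000" : String).toList = ['0','0','0'] from rfl,
    show ("u" : String).toList = ['u'] from rfl, show ("|_|" : String).toList = ['|','_','|'] from rfl,
    show ("A" : String).toList = ['A'] from rfl, show ("E" : String).toList = ['E'] from rfl,
    show ("I" : String).toList = ['I'] from rfl, show ("U" : String).toList = ['U'] from rfl]
  rw [← pvRep_eq]
  rfl

theorem pv_chain_eq_table (c : Char) :
    pvChainA c = (PySem.Dict.getD vowel_swapper_table c (String.singleton c)).toList := by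
  by_cases h1 : c = 'a'; · subst h1; decide
  by_cases h2 : c = 'A'; · subst h2; decide
  by_cases h3 : c = 'e'; · subst h3; decide
  by_cases h4 : c = 'E'; · subst h4; decide
  by_cases h5 : c = 'i'; · subst h5; decide
  by_cases h6 : c = 'I'; · subst h6; decide
  by_cases h7 : c = 'o'; · subst h7; decide
  by_cases h8 : c = 'O'; · subst h8; decide
  by_cases h9 : c = 'u'; · subst h9; decide
  by_cases h10 : c = 'U'; · subst h10; decide
  have ht : vowel_swapper_table.items =
      [('a', "4"), ('A', "4"), ('e', "3"), ('E', "3"), ('i', "!"), ('I', "!"),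
       ('o', "ooo"), ('O', "000"), ('u', "|_|"), ('U', "|_|")] := by decide
  simp [pvChainA, pvRep, pvStep, PySem.Dict.getD, PySem.Dict.get?, ht,
    h1, h2, h3, h4, h5, h6, h7, h8, h9, h10,
    Ne.symm h1, Ne.symm h2, Ne.symm h3, Ne.symm h4, Ne.symm h5,
    Ne.symm h6, Ne.symm h7, Ne.symm h8, Ne.symm h9, Ne.symm h10]

theorem pv_intercalate_nil (l : List (List Char)) : List.intercalate [] l = l.flatten := by
  induction l with
  | nil => rfl
  | cons x t ih => cases t <;> simp_all [List.intercalate, List.intersperse]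

theorem pv_alt_eq_gen (s : String) (g : Char → List Char)
    (hg : ∀ c, g c = (PySem.Dict.getD vowel_swapper_table c (String.singleton c)).toList) :
    vowel_swapper_alt s = String.ofList (s.toList.flatMap g) := by
  rw [← String.toList_inj]
  unfold vowel_swapper_alt PySem.Str.join
  simp only [String.toList_ofList, PySem.Chars.join,
    show ("" : String).toList = ([] : List Char) from rfl, pv_intercalate_nil,
    List.flatMap, List.map_map]
  congr 1
  exact List.map_congr_left (fun c _ => by
    simp only [Function.comp_apply]; exact (hg c).symm)

-- ===== VERDICT (by name: the statement is the Claim_ definition above) =====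
theorem vowel_swapper_spec : Claim_equal_vowel_swapper := by
  intro s _
  unfold Spec_vowel_swapper
  rw [pv_vowel_swapper_eq, pv_alt_eq_gen s pvChainA pv_chain_eq_table]
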